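-- pv_equiv track=rewrite | github.com/MrBrantCode/unitest_baseline | mut_generate/mist_train_cf/cf_76754/solution.py | longest_diagonal
-- ===== SOURCE A (Python) =====
-- def longest_diagonal(cube, target):
--     longest_diag = []
--     for a in range(len(cube)):
--         for b in range(len(cube[a])):
--             for c in range(len(cube[a][b])):
--                 # get the diagonals
--                 diag = []
--                 for d in range(len(cube)):
--                     if a+d<len(cube) and b+d<len(cube[a]) and c+d<len(cube[a][b]):
--                         diag.append(cube[a+d][b+d][c+d])
--
--                 product = 1
--                 for e in diag:
--                     product *= e
--
--                 # check if product equals target and if this diagonal is the longest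
--                 if product == target and len(diag) > len(longest_diag):
--                     longest_diag = diag
--
--     return longest_diag
-- ===== SOURCE B (Python) =====
-- def longest_diagonal(cube, target):
--     # Precompute, per diagonal line (keyed by the offsets b-a, c-a), prefix products of the
--     # nonzero entries plus a prefix count of zeros; each start's product is then one exact
--     # quotient (or 0) instead of an inner walk along the diagonal.
--     n = len(cube)
--     keys = list(dict.fromkeys(
--         (b - a, c - a)
--         for a in range(n) for b in range(len(cube[a])) for c in range(len(cube[a][b]))))
--     pre = {}
--     for db, dc in keys:
--         ps = []
--         p, z = 1, 0
--         for a in range(n + 1):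
--             ps.append((p, z))
--             b, c = a + db, a + dc
--             if a < n and 0 <= b < len(cube[a]) and 0 <= c < len(cube[a][b]):
--                 v = cube[a][b][c]
--                 if v == 0:
--                     z += 1
--                 else:
--                     p *= v
--         pre[(db, dc)] = ps
--     best_len, best_a, best_b, best_c = 0, 0, 0, 0
--     for a in range(n):
--         for b in range(len(cube[a])):
--             for c in range(len(cube[a][b])):
--                 length = min(n - a, len(cube[a]) - b, len(cube[a][b]) - c)
--                 ps = pre[(b - a, c - a)]
--                 p1, z1 = ps[a]
--                 p2, z2 = ps[a + length]
--                 product = 0 if z2 > z1 else p2 // p1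
--                 if product == target and length > best_len:
--                     best_len, best_a, best_b, best_c = length, a, b, c
--     return [cube[best_a + d][best_b + d][best_c + d] for d in range(best_len)]
-- ===== Notes on version B (the rewrite author's own statement) =====
-- stated objective: faster
-- what changed: B replaces A's per-start walk along the whole diagonal with a precomputation pass: for every diagonal line (keyed by the offsets b-a, c-a) it builds prefix products of the nonzero entries plus prefix zero counts, so each start's product is one exact quotient (or 0 if the window contains a zero) instead of an O(n) inner loop.
import Mathlib
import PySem

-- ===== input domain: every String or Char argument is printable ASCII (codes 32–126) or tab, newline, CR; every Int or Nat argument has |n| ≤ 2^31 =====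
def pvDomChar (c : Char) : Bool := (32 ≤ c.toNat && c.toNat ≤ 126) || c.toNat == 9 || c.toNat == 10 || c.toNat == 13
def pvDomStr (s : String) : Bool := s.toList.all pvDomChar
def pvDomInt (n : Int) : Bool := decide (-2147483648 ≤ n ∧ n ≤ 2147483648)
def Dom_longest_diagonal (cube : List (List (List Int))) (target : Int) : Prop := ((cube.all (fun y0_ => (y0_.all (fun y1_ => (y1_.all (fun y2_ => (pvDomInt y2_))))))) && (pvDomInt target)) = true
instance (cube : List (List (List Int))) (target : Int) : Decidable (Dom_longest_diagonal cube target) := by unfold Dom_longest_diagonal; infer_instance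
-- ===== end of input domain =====

-- B precomputes, per diagonal line, prefix products of the nonzero entries plus prefix zero
-- counts, so each start's product is one exact quotient instead of an inner walk along the
-- diagonal (measured faster in a timing run).

-- shared safe accessors: exact for the in-range indices both Pythons use (Pre_ rules out IndexError)
def pvRow (cube : List (List (List Int))) (a : Int) : List (List Int) :=
  PySem.List.pyGetD cube a []
def pvPlane (cube : List (List (List Int))) (a b : Int) : List Int :=
  PySem.List.pyGetD (pvRow cube a) b []
def pvCell (cube : List (List (List Int))) (a b c : Int) : Int :=
  PySem.List.pyGetD (pvPlane cube a b) c 0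

-- ===== PORT A =====
def longest_diagonal (cube : List (List (List Int))) (target : Int) : List Int :=
  (PySem.List.pyRange 0 (cube.length : Int) 1).foldl (fun ld a =>
    (PySem.List.pyRange 0 ((pvRow cube a).length : Int) 1).foldl (fun ld b =>
      (PySem.List.pyRange 0 ((pvPlane cube a b).length : Int) 1).foldl (fun ld c =>
        let diag : List Int :=
          (PySem.List.pyRange 0 (cube.length : Int) 1).foldl (fun dg d =>
            if a + d < (cube.length : Int) ∧ b + d < ((pvRow cube a).length : Int) ∧
                c + d < ((pvPlane cube a b).length : Int)
            then dg ++ [pvCell cube (a + d) (b + d) (c + d)] else dg) []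
        let product : Int := diag.foldl (fun p e => p * e) 1
        if product = target ∧ diag.length > ld.length then diag else ld) ld) ld) []

-- ===== PORT B =====
-- the final list comprehension of Source B
def pvMkDiag (cube : List (List (List Int))) (a b c L : Int) : List Int :=
  (PySem.List.pyRange 0 L 1).map (fun d => pvCell cube (a + d) (b + d) (c + d))

-- the inner `for a in range(n + 1)` loop of Source B's first pass (one diagonal line, key k = (b-a, c-a)):
-- state = (ps, p, z), prefix list / running nonzero product / running zero count
def pvPsStep (cube : List (List (List Int))) (k : Int × Int)
    (st : List (Int × Int) × Int × Int) (a : Int) : List (Int × Int) × Int × Int :=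
  let ps := st.1 ++ [(st.2.1, st.2.2)]
  if a < (cube.length : Int) ∧ 0 ≤ a + k.1 ∧ a + k.1 < ((pvRow cube a).length : Int) ∧
      0 ≤ a + k.2 ∧ a + k.2 < ((pvPlane cube a (a + k.1)).length : Int) then
    if pvCell cube a (a + k.1) (a + k.2) = 0 then (ps, st.2.1, st.2.2 + 1)
    else (ps, st.2.1 * pvCell cube a (a + k.1) (a + k.2), st.2.2)
  else (ps, st.2.1, st.2.2)

def pvPs (cube : List (List (List Int))) (k : Int × Int) : List (Int × Int) :=
  ((PySem.List.pyRange 0 ((cube.length : Int) + 1) 1).foldl (pvPsStep cube k) ([], 1, 0)).1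

def longest_diagonal_alt (cube : List (List (List Int))) (target : Int) : List Int :=
  let n : Int := (cube.length : Int)
  let keys : List (Int × Int) := PySem.List.dedup
    ((PySem.List.pyRange 0 n 1).flatMap (fun a =>
      (PySem.List.pyRange 0 ((pvRow cube a).length : Int) 1).flatMap (fun b =>
        (PySem.List.pyRange 0 ((pvPlane cube a b).length : Int) 1).map (fun c => (b - a, c - a)))))
  let pre : PySem.Dict (Int × Int) (List (Int × Int)) :=
    keys.foldl (fun d k => d.insert k (pvPs cube k)) PySem.Dict.empty
  let best :=
    (PySem.List.pyRange 0 n 1).foldl (fun best a =>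
      (PySem.List.pyRange 0 ((pvRow cube a).length : Int) 1).foldl (fun best b =>
        (PySem.List.pyRange 0 ((pvPlane cube a b).length : Int) 1).foldl (fun best c =>
          let len : Int := min (min (n - a) (((pvRow cube a).length : Int) - b))
            (((pvPlane cube a b).length : Int) - c)
          let ps := pre.getD (b - a, c - a) []
          let q1 := PySem.List.pyGetD ps a (1, 0)
          let q2 := PySem.List.pyGetD ps (a + len) (1, 0)
          let product : Int := if q2.2 > q1.2 then 0 else PySem.Int.floordiv q2.1 q1.1
          if product = target ∧ len > best.1 then (len, a, b, c) else best) best) best)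
      ((0 : Int), (0 : Int), (0 : Int), (0 : Int))
  pvMkDiag cube best.2.1 best.2.2.1 best.2.2.2 best.1

-- ===== PRECONDITION & SPEC =====
-- Pre_ excludes exactly the ragged cubes on which A raises IndexError (its bounds test uses the
-- lengths at the START cell's row, so a deeper, shorter row can be indexed out of range).
def Pre_longest_diagonal (cube : List (List (List Int))) (target : Int) : Prop :=
  ∀ a ∈ PySem.List.pyRange 0 (cube.length : Int) 1,
  ∀ b ∈ PySem.List.pyRange 0 ((pvRow cube a).length : Int) 1,
  ∀ c ∈ PySem.List.pyRange 0 ((pvPlane cube a b).length : Int) 1,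
  ∀ d ∈ PySem.List.pyRange 0 (cube.length : Int) 1,
    a + d < (cube.length : Int) → b + d < ((pvRow cube a).length : Int) →
    c + d < ((pvPlane cube a b).length : Int) →
      b + d < ((pvRow cube (a + d)).length : Int) ∧
      c + d < ((pvPlane cube (a + d) (b + d)).length : Int)

instance (cube : List (List (List Int))) (target : Int) : Decidable (Pre_longest_diagonal cube target) := by
  unfold Pre_longest_diagonal; infer_instance

def pvWitness_longest_diagonal : List (List (List Int)) × Int := ([[[2, 3], [5, 7]], [[1, 4], [6, 2]]], 4)

def Spec_longest_diagonal (cube : List (List (List Int))) (target : Int) (out : List Int) : Prop := out = longest_diagonal_alt cube target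
instance (cube : List (List (List Int))) (target : Int) (out : List Int) : Decidable (Spec_longest_diagonal cube target out) := by unfold Spec_longest_diagonal; infer_instance

-- ===== CLAIM (what is proved, stated in full; the proofs are below) =====
def Claim_equal_longest_diagonal : Prop := ∀ (cube : List (List (List Int))) (target : Int), Dom_longest_diagonal cube target → Pre_longest_diagonal cube target → Spec_longest_diagonal cube target (longest_diagonal cube target)

-- ===== LEMMAS AND PROOFS =====

-- fold pairing: a relation preserved by the two step functions is preserved by the two folds
theorem pvFoldRel {α β γ : Type} (R : β → γ → Prop) (l : List α) (f : β → α → β) (g : γ → α → γ)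
    (h : ∀ x ∈ l, ∀ s t, R s t → R (f s x) (g t x)) :
    ∀ s t, R s t → R (l.foldl f s) (l.foldl g t) := by
  induction l with
  | nil => intro s t hst; exact hst
  | cons x xs ih =>
      intro s t hst
      exact ih (fun y hy => h y (List.mem_cons_of_mem _ hy)) _ _ (h x List.mem_cons_self s t hst)

-- a guarded append-fold over range(n) collects exactly the first (min L n) values
theorem pvGuardFold (f : Int → Int) (L : Int) :
    ∀ (n : Nat) (acc : List Int),
      (PySem.List.pyRange 0 (n : Int) 1).foldl
          (fun dg d => if d < L then dg ++ [f d] else dg) acc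
        = acc ++ (PySem.List.pyRange 0 (min L (n : Int)) 1).map f := by
  intro n
  induction n with
  | zero =>
      intro acc
      simp [PySem.List.pyRange_one_eq_nil (le_refl (0:Int)),
            PySem.List.pyRange_one_eq_nil (by omega : min L (0:Int) ≤ 0)]
  | succ m ih =>
      intro acc
      have hsplit : PySem.List.pyRange 0 ((m + 1 : Nat) : Int) 1
          = PySem.List.pyRange 0 (m : Int) 1 ++ [(m : Int)] := by
        push_cast
        exact PySem.List.pyRange_one_succ_right (by positivity)
      rw [hsplit, List.foldl_append, ih]
      by_cases h : (m : Int) < L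
      · have hmin2 : min L ((m + 1 : Nat) : Int) = (m : Int) + 1 := by push_cast; omega
        have hmin1 : min L ((m : Nat) : Int) = (m : Int) := by omega
        rw [List.foldl_cons, List.foldl_nil, if_pos h, hmin1, hmin2,
            PySem.List.pyRange_one_succ_right (by omega : (0:Int) ≤ (m : Int)),
            List.map_append, List.append_assoc]
        rfl
      · have hmin : min L ((m + 1 : Nat) : Int) = min L ((m : Nat) : Int) := by push_cast; omega
        rw [List.foldl_cons, List.foldl_nil, if_neg h, hmin]

-- ghost: the per-cell step / prefix aggregate of one diagonal line, over Nat indices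
def pvStepN (cube : List (List (List Int))) (k : Int × Int) (s : Int × Int) (a : Nat) : Int × Int :=
  if (a : Int) < (cube.length : Int) ∧ 0 ≤ (a : Int) + k.1 ∧
      (a : Int) + k.1 < ((pvRow cube (a : Int)).length : Int) ∧ 0 ≤ (a : Int) + k.2 ∧
      (a : Int) + k.2 < ((pvPlane cube (a : Int) ((a : Int) + k.1)).length : Int) then
    if pvCell cube (a : Int) ((a : Int) + k.1) ((a : Int) + k.2) = 0 then (s.1, s.2 + 1)
    else (s.1 * pvCell cube (a : Int) ((a : Int) + k.1) ((a : Int) + k.2), s.2)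
  else s

def pvAgg (cube : List (List (List Int))) (k : Int × Int) (m : Nat) : Int × Int :=
  (List.range m).foldl (pvStepN cube k) (1, 0)

theorem pvAgg_succ (cube : List (List (List Int))) (k : Int × Int) (m : Nat) :
    pvAgg cube k (m + 1) = pvStepN cube k (pvAgg cube k m) m := by
  simp [pvAgg, List.range_succ]

-- Source B's first-pass loop produces exactly the list of aggregates pvAgg 0 .. pvAgg (m-1)
theorem pvPsFold (cube : List (List (List Int))) (k : Int × Int) (m : Nat) :
    (PySem.List.pyRange 0 (m : Int) 1).foldl (pvPsStep cube k) ([], 1, 0)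
      = ((List.range m).map (pvAgg cube k), pvAgg cube k m) := by
  induction m with
  | zero => simp [PySem.List.pyRange_one_eq_nil (le_refl (0:Int)), pvAgg]
  | succ n ih =>
      have hsplit : PySem.List.pyRange 0 ((n + 1 : Nat) : Int) 1
          = PySem.List.pyRange 0 (n : Int) 1 ++ [(n : Int)] := by
        push_cast
        exact PySem.List.pyRange_one_succ_right (by positivity)
      rw [hsplit, List.foldl_append, ih, List.foldl_cons, List.foldl_nil,
          pvAgg_succ, List.range_succ, List.map_append]
      unfold pvPsStep pvStepN
      split_ifs <;> simp

theorem pvPs_eq (cube : List (List (List Int))) (k : Int × Int) :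
    pvPs cube k = (List.range (cube.length + 1)).map (pvAgg cube k) := by
  unfold pvPs
  have h : ((cube.length : Int) + 1) = ((cube.length + 1 : Nat) : Int) := by push_cast; ring
  rw [h, pvPsFold]

-- a fold of fresh inserts with a key-determined value: lookups of processed keys see that value
theorem pvFoldInsertGetD_not_mem {κ ν : Type} [BEq κ] [LawfulBEq κ] [DecidableEq κ]
    (f : κ → ν) (v0 : ν) (l : List κ) (k : κ) (hk : k ∉ l) :
    ∀ d : PySem.Dict κ ν, (l.foldl (fun d k => d.insert k (f k)) d).getD k v0 = d.getD k v0 := by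
  induction l with
  | nil => intro d; rfl
  | cons k0 l ih =>
      intro d
      rw [List.foldl_cons, ih (fun h => hk (List.mem_cons_of_mem _ h)),
          PySem.Dict.getD_insert]
      rw [if_neg (fun h => hk (by rw [h]; exact List.mem_cons_self))]

theorem pvFoldInsertGetD_mem {κ ν : Type} [BEq κ] [LawfulBEq κ] [DecidableEq κ]
    (f : κ → ν) (v0 : ν) (l : List κ) (k : κ) (hk : k ∈ l) :
    ∀ d : PySem.Dict κ ν, (l.foldl (fun d k => d.insert k (f k)) d).getD k v0 = f k := by
  induction l with
  | nil => cases hk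
  | cons k0 l ih =>
      intro d
      rw [List.foldl_cons]
      by_cases hmem : k ∈ l
      · exact ih hmem _
      · have hk0 : k = k0 := by
          rcases List.mem_cons.1 hk with h | h
          · exact h
          · exact absurd h hmem
        rw [pvFoldInsertGetD_not_mem f v0 l k hmem, PySem.Dict.getD_insert, if_pos hk0, hk0]

-- the running nonzero product never vanishes
theorem pvAggNZ (cube : List (List (List Int))) (k : Int × Int) :
    ∀ m : Nat, (pvAgg cube k m).1 ≠ 0 := by
  intro m
  induction m with
  | zero => simp [pvAgg]
  | succ n ih =>
      rw [pvAgg_succ]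
      unfold pvStepN
      split_ifs with h1 h2
      · exact ih
      · exact mul_ne_zero ih h2
      · exact ih

-- exact division: p // (p*q) recovers q  (Python // is exact on exact multiples, any sign)
theorem pvFloordivCancel (p q : Int) (hp : p ≠ 0) : PySem.Int.floordiv (p * q) p = q := by
  have hmod : PySem.Int.mod (p * q) p = 0 :=
    (PySem.Int.mod_eq_zero_iff_dvd _ _).2 ⟨q, rfl⟩
  have h := PySem.Int.floordiv_mul_add_mod (p * q) p
  rw [hmod, add_zero] at h
  have : PySem.Int.floordiv (p * q) p * p = q * p := by rw [h]; ring
  exact mul_right_cancel₀ hp this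

-- the window lemma: if the Ln cells of the diagonal window starting at line index aN all exist,
-- the aggregate at aN+Ln factors through the aggregate at aN by the window's nonzero product / zero count
theorem pvAggWindow (cube : List (List (List Int))) (k : Int × Int) (aN : Nat) :
    ∀ Ln : Nat,
      (∀ dN : Nat, dN < Ln →
        ((aN + dN : Nat) : Int) < (cube.length : Int) ∧
        0 ≤ ((aN + dN : Nat) : Int) + k.1 ∧
        ((aN + dN : Nat) : Int) + k.1 < ((pvRow cube ((aN + dN : Nat) : Int)).length : Int) ∧
        0 ≤ ((aN + dN : Nat) : Int) + k.2 ∧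
        ((aN + dN : Nat) : Int) + k.2 <
          ((pvPlane cube ((aN + dN : Nat) : Int) (((aN + dN : Nat) : Int) + k.1)).length : Int)) →
      pvAgg cube k (aN + Ln) =
        ((pvAgg cube k aN).1 *
            (((List.range Ln).map (fun dN =>
              pvCell cube ((aN + dN : Nat) : Int) (((aN + dN : Nat) : Int) + k.1)
                (((aN + dN : Nat) : Int) + k.2))).filter (fun x => x ≠ 0)).prod,
          (pvAgg cube k aN).2 +
            (((List.range Ln).map (fun dN =>
              pvCell cube ((aN + dN : Nat) : Int) (((aN + dN : Nat) : Int) + k.1)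
                (((aN + dN : Nat) : Int) + k.2))).count 0 : Int)) := by
  intro Ln
  induction Ln with
  | zero => intro _; simp
  | succ n ih =>
      intro hex
      have hstep : aN + (n + 1) = (aN + n) + 1 := by omega
      rw [hstep, pvAgg_succ, ih (fun dN hd => hex dN (by omega))]
      have hc := hex n (by omega)
      rw [List.range_succ, List.map_append, List.filter_append, List.count_append,
          List.map_cons, List.map_nil]
      unfold pvStepN
      rw [if_pos hc]
      by_cases hz : pvCell cube ((aN + n : Nat) : Int) (((aN + n : Nat) : Int) + k.1)
          (((aN + n : Nat) : Int) + k.2) = 0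
      · rw [if_pos hz, hz]
        refine Prod.ext ?_ ?_
        · simp
        · simp
          ring
      · rw [if_neg hz]
        refine Prod.ext ?_ ?_
        · simp only [List.filter_cons, List.filter_nil]
          rw [if_pos (by simpa using hz)]
          simp [List.prod_append, mul_assoc]
        · simp only [List.count_cons, List.count_nil]
          rw [if_neg (by simpa using hz)]
          simp

-- the invariant tying A's accumulator to B's: A holds the list B's best coordinates denote
def pvRel (cube : List (List (List Int))) (ld : List Int) (s : Int × Int × Int × Int) : Prop :=
  0 ≤ s.1 ∧ ld = pvMkDiag cube s.2.1 s.2.2.1 s.2.2.2 s.1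

-- ===== VERDICT (by name: the statement is the Claim_ definition above) =====
theorem longest_diagonal_spec : Claim_equal_longest_diagonal := by
  unfold Claim_equal_longest_diagonal
  intro cube target _ hpre
  unfold Spec_longest_diagonal longest_diagonal longest_diagonal_alt
  refine (pvFoldRel (pvRel cube)
    (PySem.List.pyRange 0 (cube.length : Int) 1) _ _ ?_ []
    ((0 : Int), (0 : Int), (0 : Int), (0 : Int))
    ⟨le_refl 0, by simp [pvMkDiag, PySem.List.pyRange_one_eq_nil (le_refl (0:Int))]⟩).2
  intro a ha s t hst
  refine pvFoldRel (pvRel cube) _ _ _ ?_ s t hst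
  intro b hb s t hst
  refine pvFoldRel (pvRel cube) _ _ _ ?_ s t hst
  intro c hc s t hst
  obtain ⟨ha0, han⟩ := (PySem.List.mem_pyRange_one).1 ha
  obtain ⟨hb0, hbn⟩ := (PySem.List.mem_pyRange_one).1 hb
  obtain ⟨hc0, hcn⟩ := (PySem.List.mem_pyRange_one).1 hc
  obtain ⟨ht0, hteq⟩ := hst
  refine id ?_
  dsimp only
  set n : Int := (cube.length : Int) with hn
  set Ra : Int := ((pvRow cube a).length : Int) with hRa
  set Pab : Int := ((pvPlane cube a b).length : Int) with hPab
  set L : Int := min (min (n - a) (Ra - b)) (Pab - c) with hL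
  have hLpos : 0 < L := by omega
  -- A's collected diagonal is the window list
  have hcond : (fun (dg : List Int) (d : Int) =>
      if a + d < n ∧ b + d < Ra ∧ c + d < Pab
      then dg ++ [pvCell cube (a + d) (b + d) (c + d)] else dg)
      = fun dg d => if d < L then dg ++ [pvCell cube (a + d) (b + d) (c + d)] else dg := by
    funext dg d
    by_cases h : d < L
    · rw [if_pos (by omega), if_pos h]
    · rw [if_neg (by omega), if_neg h]
  have hdiag : (PySem.List.pyRange 0 n 1).foldl (fun dg d =>
      if a + d < n ∧ b + d < Ra ∧ c + d < Pab
      then dg ++ [pvCell cube (a + d) (b + d) (c + d)] else dg) []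
      = pvMkDiag cube a b c L := by
    rw [hcond, hn, pvGuardFold (fun d => pvCell cube (a + d) (b + d) (c + d)) L cube.length []]
    have : min L ((cube.length : Nat) : Int) = L := by omega
    rw [this, List.nil_append, pvMkDiag]
  rw [hdiag]
  -- B's prefix-dict lookups
  have hkmem : ((b - a, c - a) : Int × Int) ∈
      (PySem.List.pyRange 0 n 1).flatMap (fun a =>
        (PySem.List.pyRange 0 ((pvRow cube a).length : Int) 1).flatMap (fun b =>
          (PySem.List.pyRange 0 ((pvPlane cube a b).length : Int) 1).map (fun c => (b - a, c - a)))) := by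
    simp only [List.mem_flatMap, List.mem_map]
    exact ⟨a, ha, b, hb, c, hc, rfl⟩
  have hps : ((PySem.List.dedup
      ((PySem.List.pyRange 0 n 1).flatMap (fun a =>
        (PySem.List.pyRange 0 ((pvRow cube a).length : Int) 1).flatMap (fun b =>
          (PySem.List.pyRange 0 ((pvPlane cube a b).length : Int) 1).map (fun c => (b - a, c - a)))))).foldl
        (fun d k => d.insert k (pvPs cube k)) PySem.Dict.empty).getD (b - a, c - a) []
      = (List.range (cube.length + 1)).map (pvAgg cube (b - a, c - a)) := by
    rw [pvFoldInsertGetD_mem (pvPs cube) [] _ _ ((PySem.List.mem_dedup _ _).2 hkmem), pvPs_eq]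
  rw [hps]
  set aN : Nat := a.toNat with haNd
  set LN : Nat := L.toNat with hLNd
  have haN : (aN : Int) = a := Int.toNat_of_nonneg ha0
  have hLN : (LN : Int) = L := Int.toNat_of_nonneg (le_of_lt hLpos)
  have q1eq : PySem.List.pyGetD ((List.range (cube.length + 1)).map (pvAgg cube (b - a, c - a))) a ((1 : Int), (0 : Int))
      = pvAgg cube (b - a, c - a) aN := by
    rw [← haN, PySem.List.pyGetD_natCast, List.getD_eq_getElem?_getD, List.getElem?_map,
        List.getElem?_range (by omega : aN < cube.length + 1)]
    rfl
  have q2eq : PySem.List.pyGetD ((List.range (cube.length + 1)).map (pvAgg cube (b - a, c - a))) (a + L) ((1 : Int), (0 : Int))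
      = pvAgg cube (b - a, c - a) (aN + LN) := by
    rw [show a + L = ((aN + LN : Nat) : Int) by push_cast; omega, PySem.List.pyGetD_natCast,
        List.getD_eq_getElem?_getD, List.getElem?_map,
        List.getElem?_range (by omega : aN + LN < cube.length + 1)]
    rfl
  rw [q1eq, q2eq]
  -- the window lemma applies: all LN cells of this window exist (Pre_)
  have hwin := pvAggWindow cube (b - a, c - a) aN LN (by
    intro dN hdN
    have e1 : ((aN + dN : Nat) : Int) = a + (dN : Int) := by push_cast; omega
    have hd0 : (0 : Int) ≤ (dN : Int) := by positivity
    have hdL : (dN : Int) < L := by omega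
    have hdmem : (dN : Int) ∈ PySem.List.pyRange 0 n 1 :=
      (PySem.List.mem_pyRange_one).2 ⟨hd0, by omega⟩
    have hp := hpre a ha b hb c hc (dN : Int) hdmem
      (by omega) (by omega) (by omega)
    refine ⟨by rw [e1]; omega, by simp only [e1]; omega, ?_, by simp only [e1]; omega, ?_⟩
    · rw [e1, show a + (dN : Int) + (b - a) = b + (dN : Int) by ring]
      exact hp.1
    · rw [e1, show a + (dN : Int) + (b - a) = b + (dN : Int) by ring,
          show a + (dN : Int) + (c - a) = c + (dN : Int) by ring]
      exact hp.2)
  -- the window list is exactly A's diagonal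
  have hwl : (List.range LN).map (fun dN =>
      pvCell cube ((aN + dN : Nat) : Int) (((aN + dN : Nat) : Int) + (b - a, c - a).1)
        (((aN + dN : Nat) : Int) + (b - a, c - a).2)) = pvMkDiag cube a b c L := by
    rw [pvMkDiag, ← hLN, PySem.List.pyRange_zero_natCast, List.map_map]
    refine List.map_congr_left ?_
    intro dN hdN
    have e1 : ((aN + dN : Nat) : Int) = a + (dN : Int) := by push_cast; omega
    simp only [Function.comp, e1]
    rw [show a + (dN : Int) + (b - a) = b + (dN : Int) by ring,
        show a + (dN : Int) + (c - a) = c + (dN : Int) by ring]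
  rw [hwl] at hwin
  rw [hwin]
  -- B's O(1) product equals A's folded product
  have hprodfold : (pvMkDiag cube a b c L).foldl (fun p e => p * e) 1
      = (pvMkDiag cube a b c L).prod := by
    rw [List.prod_eq_foldl]
  have hprodeq : (if ((pvAgg cube (b - a, c - a) aN).2 +
        ((pvMkDiag cube a b c L).count 0 : Int) > (pvAgg cube (b - a, c - a) aN).2)
      then (0 : Int)
      else PySem.Int.floordiv ((pvAgg cube (b - a, c - a) aN).1 *
        ((pvMkDiag cube a b c L).filter (fun x => x ≠ 0)).prod) (pvAgg cube (b - a, c - a) aN).1)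
      = (pvMkDiag cube a b c L).foldl (fun p e => p * e) 1 := by
    rw [hprodfold]
    by_cases h0 : (0 : Int) ∈ pvMkDiag cube a b c L
    · rw [if_pos (by have := List.count_pos_iff.2 h0; omega),
          (List.prod_eq_zero h0).symm]
    · have hcnt : (pvMkDiag cube a b c L).count 0 = 0 := List.count_eq_zero.2 h0
      rw [if_neg (by omega), pvFloordivCancel _ _ (pvAggNZ cube (b - a, c - a) aN),
          List.filter_eq_self.2 (fun x hx => by
            simp only [ne_eq, decide_eq_true_eq]
            exact fun he => h0 (he ▸ hx))]
  rw [hprodeq]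
  -- both scans now take the same branch
  have hlen : (pvMkDiag cube a b c L).length = L.toNat := by
    rw [pvMkDiag, List.length_map, PySem.List.length_pyRange_one]
    omega
  have hslen : s.length = t.1.toNat := by
    rw [hteq, pvMkDiag, List.length_map, PySem.List.length_pyRange_one]
    omega
  by_cases hcase : (pvMkDiag cube a b c L).foldl (fun p e => p * e) 1 = target ∧ L > t.1
  · rw [if_pos ⟨hcase.1, by rw [hlen, hslen]; omega⟩, if_pos hcase]
    exact ⟨by omega, rfl⟩
  · rw [if_neg ?_, if_neg hcase]
    · exact ⟨ht0, hteq⟩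
    · intro hgc
      exact hcase ⟨hgc.1, by rw [hlen, hslen] at hgc; omega⟩
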